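-- pv_equiv track=rewrite | github.com/Nogal2222/CoTe | 프로그래머스/level 2/더 맵게.py | solution
-- ===== SOURCE A (Python) =====
-- import heapq #파이썬 내장함수 heapq는 최소힙
--
-- def solution(scoville, k):
--     answer = 0
--     scoville.sort() #heapify와 같음
--
--     while scoville[0] < k:
--         if len(scoville) <= 1:
--             return -1
--
--         else:
--             first = heapq.heappop(scoville)
--             second = heapq.heappop(scoville)
--             blended = first + (second * 2)
--             #heappush는 최솟값을 배열 제일 앞으로 해줌
--             heapq.heappush(scoville, blended)
--             answer += 1
--
--     return answer
-- ===== SOURCE B (Python) =====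
-- def _base_first(base, i, blends, j):
--     # take from the sorted base unless the front blend is strictly smaller
--     return j == len(blends) or (i < len(base) and base[i] <= blends[j])
--
-- def solution(scoville, k):
--     # Two-queue trick: after sorting, blended values are produced in nondecreasing
--     # order (for nonnegative scoville), so a plain FIFO of blends replaces the heap
--     # and every merge costs O(1) instead of O(log n).
--     base = sorted(scoville)
--     blends = []
--     i = 0
--     j = 0
--     answer = 0
--     while True:
--         if _base_first(base, i, blends, j):
--             smallest = base[i]        # IndexError on empty input, like A
--         else:
--             smallest = blends[j]
--         if smallest >= k:
--             return answer
--         if (len(base) - i) + (len(blends) - j) <= 1: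
--             return -1
--         if _base_first(base, i, blends, j):
--             first = base[i]; i += 1
--         else:
--             first = blends[j]; j += 1
--         if _base_first(base, i, blends, j):
--             second = base[i]; i += 1
--         else:
--             second = blends[j]; j += 1
--         blends.append(first + second * 2)
--         answer += 1
-- ===== Notes on version B (the rewrite author's own statement) =====
-- stated objective: faster
-- what changed: Replaces the heap entirely by the two-queue merge technique: after one sort, blended values are provably produced in an order that keeps a plain FIFO of blends sorted, so each minimum is found by comparing the two queue fronts and every merge costs O(1) instead of a heap push/pop of O(log n).
import Mathlib
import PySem

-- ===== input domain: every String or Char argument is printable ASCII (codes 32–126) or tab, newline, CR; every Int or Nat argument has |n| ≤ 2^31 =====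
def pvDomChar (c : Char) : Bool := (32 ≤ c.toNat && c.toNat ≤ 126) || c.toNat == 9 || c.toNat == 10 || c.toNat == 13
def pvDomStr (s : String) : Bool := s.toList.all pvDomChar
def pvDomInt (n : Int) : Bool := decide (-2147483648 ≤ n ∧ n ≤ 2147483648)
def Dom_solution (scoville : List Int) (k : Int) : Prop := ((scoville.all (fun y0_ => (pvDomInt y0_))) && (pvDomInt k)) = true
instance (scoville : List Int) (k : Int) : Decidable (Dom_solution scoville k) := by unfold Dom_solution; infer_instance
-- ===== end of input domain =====

-- B replaces A's heap by the two-queue merge technique (sorted base cursor + FIFO of blends);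
-- equivalence is about the RETURN value only (both Pythons mutate their lists in place,
-- leaving different residues behind).

-- ===== PORT A =====
-- heapq ported by its heap semantics (exact for the return value): in a heap, index 0 is the
-- minimum, heappop removes one minimal element, heappush adds its argument to the collection.
def heapPopMin (l : List Int) : Option Int × List Int :=
  match l.min? with
  | none => (none, l)
  | some m => (some m, l.erase m)

def solutionLoop (k : Int) : Nat → List Int → Int → Int
  | 0, _, ans => ans
  | fuel + 1, h, ans =>
    match h.min? with                        -- scoville[0] of the heap: its minimum
    | none => ans                            -- empty: Python raises IndexError (outside Pre_)
    | some m0 =>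
      if m0 < k then
        if h.length ≤ 1 then -1
        else
          let p1 := heapPopMin h
          let first := p1.1.getD 0
          let p2 := heapPopMin p1.2
          let second := p2.1.getD 0
          solutionLoop k fuel (p2.2 ++ [first + second * 2]) (ans + 1)
      else ans

def solution (scoville : List Int) (k : Int) : Int :=
  solutionLoop k scoville.length (PySem.List.sorted scoville (fun x => x) false) 0

-- ===== PORT B =====
-- _base_first(base, i, blends, j): take from the sorted base unless the front blend is
-- strictly smaller (both getD reads are guarded in range by the two tests, as in Python)
def baseFirst (base : List Int) (i : Nat) (blends : List Int) (j : Nat) : Bool :=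
  j == blends.length || (decide (i < base.length) && decide (base.getD i 0 ≤ blends.getD j 0))

-- one 'if _base_first: take base[i]; i += 1 else: take blends[j]; j += 1' block of Source B
def pyPop (base : List Int) (i : Nat) (blends : List Int) (j : Nat) : Int × Nat × Nat :=
  if baseFirst base i blends j then (base.getD i 0, i + 1, j) else (blends.getD j 0, i, j + 1)

def altLoop (k : Int) (base : List Int) : Nat → Nat → Nat → List Int → Int → Int
  | 0, _, _, _, ans => ans
  | fuel + 1, i, j, blends, ans =>
    match (if baseFirst base i blends j then base[i]? else blends[j]?) with
    | none => ans                            -- Python raises IndexError here (empty input, outside Pre_)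
    | some smallest =>
      if smallest < k then                   -- python: 'if smallest >= k: return answer', inverted branch order
        if (base.length - i) + (blends.length - j) ≤ 1 then -1
        else
          let s1 := pyPop base i blends j
          let s2 := pyPop base s1.2.1 blends s1.2.2
          altLoop k base fuel s2.2.1 s2.2.2 (blends ++ [s1.1 + s2.1 * 2]) (ans + 1)
      else ans

def solution_alt (scoville : List Int) (k : Int) : Int :=
  altLoop k (PySem.List.sorted scoville (fun x => x) false) scoville.length 0 0 [] 0

-- ===== PRECONDITION & SPEC =====
-- Pre_ excludes only the empty list, on which both Pythons raise IndexError at the first access.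
def Pre_solution (scoville : List Int) (_k : Int) : Prop := scoville ≠ []
instance (scoville : List Int) (k : Int) : Decidable (Pre_solution scoville k) := by
  unfold Pre_solution; infer_instance
def pvWitness_solution : List Int × Int := ([1, 2, 3, 9, 10, 12], 7)

def Spec_solution (scoville : List Int) (k : Int) (out : Int) : Prop := out = solution_alt scoville k
instance (scoville : List Int) (k : Int) (out : Int) : Decidable (Spec_solution scoville k out) := by unfold Spec_solution; infer_instance

-- ===== CLAIM (what is proved, stated in full; the proofs are below) =====
def Claim_equal_solution : Prop := ∀ (scoville : List Int) (k : Int), Dom_solution scoville k → Pre_solution scoville k → Spec_solution scoville k (solution scoville k)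

-- ===== LEMMAS AND PROOFS =====

-- Proof-only middle model: the sorted working list with ordered reinsertion.
def insortRight (x : Int) : List Int → List Int
  | [] => [x]
  | y :: ys => if x < y then x :: y :: ys else y :: insortRight x ys

def specLoop (k : Int) : Nat → List Int → Int → Int
  | 0, _, ans => ans
  | fuel + 1, s, ans =>
    match s with
    | [] => ans
    | [x] => if x < k then -1 else ans
    | x :: y :: rest =>
      if x < k then specLoop k fuel (insortRight (x + y * 2) rest) (ans + 1) else ans

-- Proof-only suffix model of B: bs = base.drop i, qs = blends.drop j.
def sfxPop (bs qs : List Int) : Int × List Int × List Int :=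
  match bs, qs with
  | [], [] => (0, [], [])
  | [], q :: qt => (q, [], qt)
  | b :: bt, [] => (b, bt, [])
  | b :: bt, q :: qt => if b ≤ q then (b, bt, q :: qt) else (q, b :: bt, qt)

def sfxLoop (k : Int) : Nat → List Int → List Int → Int → Int
  | 0, _, _, ans => ans
  | fuel + 1, bs, qs, ans =>
    match bs, qs with
    | [], [] => ans
    | bs, qs =>
      let sm := (sfxPop bs qs).1
      if sm < k then
        if bs.length + qs.length ≤ 1 then -1
        else
          let p1 := sfxPop bs qs
          let p2 := sfxPop p1.2.1 p1.2.2
          sfxLoop k fuel p2.2.1 (p2.2.2 ++ [p1.1 + p2.1 * 2]) (ans + 1)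
      else ans

-- Invariant: each unconsumed blend q was built as p + 2r from values p ≤ r that are ≤ every
-- element still available (the base suffix and the earlier blends).
def QInv (avail : List Int) : List Int → Prop
  | [] => True
  | q :: rest => (∃ p r, q = p + r * 2 ∧ p ≤ r ∧ ∀ b ∈ avail, r ≤ b) ∧ QInv (q :: avail) rest

lemma QInv_weaken {A B qs} (h : QInv A qs) (hsub : ∀ b ∈ B, b ∈ A) : QInv B qs := by
  induction qs generalizing A B with
  | nil => trivial
  | cons q qt ih =>
    obtain ⟨⟨p, r, hq, hpr, hr⟩, hrest⟩ := h
    refine ⟨⟨p, r, hq, hpr, fun b hb => hr b (hsub b hb)⟩, ih hrest ?_⟩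
    intro b hb
    rcases List.mem_cons.mp hb with h | h
    · exact h ▸ List.mem_cons_self
    · exact List.mem_cons_of_mem _ (hsub b h)

lemma QInv_append {A qs b} (h : QInv A qs)
    (hw : ∃ p r, b = p + r * 2 ∧ p ≤ r ∧ (∀ x ∈ A, r ≤ x) ∧ (∀ x ∈ qs, r ≤ x)) :
    QInv A (qs ++ [b]) := by
  induction qs generalizing A with
  | nil =>
    obtain ⟨p, r, hb, hpr, hA, _⟩ := hw
    exact ⟨⟨p, r, hb, hpr, hA⟩, trivial⟩
  | cons q qt ih =>
    obtain ⟨hq, hrest⟩ := h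
    obtain ⟨p, r, hb, hpr, hA, hqs⟩ := hw
    refine ⟨hq, ih hrest ⟨p, r, hb, hpr, ?_, ?_⟩⟩
    · intro x hx
      rcases List.mem_cons.mp hx with h | h
      · exact h ▸ hqs q List.mem_cons_self
      · exact hA x h
    · exact fun x hx => hqs x (List.mem_cons_of_mem _ hx)

lemma QInv_bound {A qs} (h : QInv A qs) (x y : Int) (hx : x ∈ A) (hy : y ∈ A) (hxy : x ≤ y) :
    ∀ q ∈ qs, q ≤ x + y * 2 := by
  induction qs generalizing A with
  | nil => intro q hq; cases hq
  | cons q qt ih =>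
    obtain ⟨⟨p, r, hq, hpr, hr⟩, hrest⟩ := h
    intro q' hq'
    rcases List.mem_cons.mp hq' with h | h
    · subst h
      have h1 := hr x hx
      have h2 := hr y hy
      omega
    · exact ih hrest (List.mem_cons_of_mem _ hx) (List.mem_cons_of_mem _ hy) q' h

lemma pairwise_le_head {x : Int} {rest : List Int}
    (hs : (x :: rest).Pairwise (· ≤ ·)) : ∀ b ∈ x :: rest, x ≤ b := by
  intro b hb
  rcases List.mem_cons.mp hb with h | h
  · exact le_of_eq h.symm
  · exact (List.pairwise_cons.mp hs).1 b h

lemma min?_of_perm_sorted {h : List Int} {x : Int} {rest : List Int}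
    (hp : h.Perm (x :: rest)) (hs : (x :: rest).Pairwise (· ≤ ·)) : h.min? = some x := by
  refine List.min?_eq_some_iff.mpr ⟨hp.mem_iff.mpr List.mem_cons_self, ?_⟩
  intro b hb
  exact pairwise_le_head hs b (hp.mem_iff.mp hb)

lemma insort_perm (x : Int) (l : List Int) : (insortRight x l).Perm (x :: l) := by
  induction l with
  | nil => simp [insortRight]
  | cons y ys ih =>
    by_cases hx : x < y
    · simp [insortRight, hx]
    · simpa [insortRight, hx] using ((ih.cons y).trans (List.Perm.swap x y ys))

lemma insort_mem {x b : Int} {l : List Int} (hb : b ∈ insortRight x l) :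
    b = x ∨ b ∈ l := by
  have := (insort_perm x l).mem_iff.mp hb
  simpa using this

lemma insort_sorted (x : Int) {l : List Int} (h : l.Pairwise (· ≤ ·)) :
    (insortRight x l).Pairwise (· ≤ ·) := by
  induction l with
  | nil => simp [insortRight]
  | cons y ys ih =>
    rcases List.pairwise_cons.mp h with ⟨hy, hys⟩
    by_cases hx : x < y
    · simp only [insortRight, if_pos hx]
      refine List.pairwise_cons.mpr ⟨?_, h⟩
      intro b hb
      rcases List.mem_cons.mp hb with hb | hb
      · exact le_of_lt (hb ▸ hx)
      · exact le_trans (le_of_lt hx) (hy b hb)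
    · simp only [insortRight, if_neg hx]
      refine List.pairwise_cons.mpr ⟨?_, ih hys⟩
      intro b hb
      rcases insort_mem hb with hb | hb
      · exact hb ▸ le_of_not_gt hx
      · exact hy b hb

-- PART 1: A's heap loop equals the sorted-list middle model.
lemma heap_eq_spec (k : Int) : ∀ (fuel : Nat) (h s : List Int) (ans : Int),
    h.Perm s → s.Pairwise (· ≤ ·) → solutionLoop k fuel h ans = specLoop k fuel s ans := by
  intro fuel
  induction fuel with
  | zero => intro h s ans _ _; rfl
  | succ fuel ih =>
    intro h s ans hp hs
    match s with
    | [] =>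
      have hh : h = [] := hp.eq_nil
      simp [solutionLoop, specLoop, hh]
    | [x] =>
      have hmin : h.min? = some x := min?_of_perm_sorted hp hs
      have hlen : h.length = 1 := by simpa using hp.length_eq
      simp [solutionLoop, specLoop, hmin, hlen]
    | x :: y :: rest =>
      have hmin : h.min? = some x := min?_of_perm_sorted hp hs
      have hlen : h.length = rest.length + 2 := by simpa using hp.length_eq
      have hp1 : (h.erase x).Perm (y :: rest) :=
        (hp.erase x).trans (by simp [List.erase_cons_head])
      have hs1 : (y :: rest).Pairwise (· ≤ ·) := (List.pairwise_cons.mp hs).2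
      have hmin1 : (h.erase x).min? = some y := min?_of_perm_sorted hp1 hs1
      have hp2 : ((h.erase x).erase y).Perm rest :=
        (hp1.erase y).trans (by simp [List.erase_cons_head])
      simp only [solutionLoop, specLoop, hmin, hmin1, heapPopMin]
      by_cases hxk : x < k
      · have hnl : ¬ h.length ≤ 1 := by omega
        simp only [if_pos hxk, if_neg hnl, Option.getD_some]
        exact ih _ _ _
          (((List.perm_append_singleton _ _).trans (hp2.cons _)).trans (insort_perm (x + y * 2) rest).symm)
          (insort_sorted _ (List.Pairwise.sublist (by simp) hs1))
      · simp [hxk]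

-- one pop: the chosen element is the minimum; bookkeeping for sortedness and QInv.
lemma pop_step {bs qs : List Int} {x : Int} {t : List Int}
    (hp : (bs ++ qs).Perm (x :: t)) (hbs : bs.Pairwise (· ≤ ·)) (hqs : qs.Pairwise (· ≤ ·))
    (hx : ∀ b ∈ bs ++ qs, x ≤ b) :
    ∃ bs' qs', sfxPop bs qs = (x, bs', qs') ∧ (bs' ++ qs').Perm t ∧
      bs'.Pairwise (· ≤ ·) ∧ qs'.Pairwise (· ≤ ·) ∧ (∀ b ∈ bs', b ∈ bs) ∧
      ((qs' = qs ∧ x ∈ bs) ∨ qs = x :: qs') := by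
  match bs, qs with
  | [], [] => exact absurd (hp.symm.eq_nil) (by simp)
  | [], q :: qt =>
    have hxq : x = q := le_antisymm (hx q (by simp))
      (pairwise_le_head hqs x (hp.mem_iff.mpr List.mem_cons_self))
    subst hxq
    refine ⟨[], qt, rfl, ?_, by simp, (List.pairwise_cons.mp hqs).2, by simp, Or.inr rfl⟩
    simpa using hp.cons_inv (l₁ := qt) (l₂ := t)
  | b :: bt, [] =>
    have hxb : x = b := le_antisymm (hx b (by simp))
      (pairwise_le_head (by simpa using hbs) x (hp.mem_iff.mpr List.mem_cons_self))
    subst hxb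
    refine ⟨bt, [], rfl, ?_, (List.pairwise_cons.mp hbs).2, List.Pairwise.nil,
      fun b hb => List.mem_cons_of_mem _ hb, Or.inl ⟨rfl, List.mem_cons_self⟩⟩
    have hp' : (x :: bt).Perm (x :: t) := by simpa using hp
    simpa using hp'.cons_inv
  | b :: bt, q :: qt =>
    by_cases hbq : b ≤ q
    · have hble : ∀ c ∈ (b :: bt) ++ q :: qt, b ≤ c := by
        intro c hc
        rcases List.mem_append.mp hc with hc | hc
        · exact pairwise_le_head hbs c hc
        · exact le_trans hbq (pairwise_le_head hqs c hc)
      have hxb : x = b := le_antisymm (hx b (by simp))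
        (hble x (hp.mem_iff.mpr List.mem_cons_self))
      subst hxb
      refine ⟨bt, q :: qt, by simp [sfxPop, hbq], ?_, (List.pairwise_cons.mp hbs).2, hqs,
        fun c hc => List.mem_cons_of_mem _ hc, Or.inl ⟨rfl, List.mem_cons_self⟩⟩
      exact (hp.cons_inv (l₁ := bt ++ q :: qt) (l₂ := t))
    · have hqle : ∀ c ∈ (b :: bt) ++ q :: qt, q ≤ c := by
        intro c hc
        rcases List.mem_append.mp hc with hc | hc
        · exact le_trans (le_of_not_ge hbq) (pairwise_le_head hbs c hc)
        · exact pairwise_le_head hqs c hc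
      have hxq : x = q := le_antisymm (hx q (by simp))
        (hqle x (hp.mem_iff.mpr List.mem_cons_self))
      subst hxq
      refine ⟨b :: bt, qt, by simp [sfxPop, hbq], ?_, hbs, (List.pairwise_cons.mp hqs).2,
        fun c hc => hc, Or.inr rfl⟩
      have hmid : ((b :: bt) ++ x :: qt).Perm (x :: ((b :: bt) ++ qt)) := List.perm_middle
      exact (hmid.symm.trans hp).cons_inv
-- one pop, with the QInv 'available values' accumulator threaded through.
lemma pop_inv {A bs qs : List Int} {x : Int} {t : List Int}
    (hp : (bs ++ qs).Perm (x :: t)) (hbs : bs.Pairwise (· ≤ ·)) (hqs : qs.Pairwise (· ≤ ·))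
    (hx : ∀ b ∈ bs ++ qs, x ≤ b) (hQ : QInv A qs) (hsub : ∀ b ∈ bs, b ∈ A) :
    ∃ bs' qs' A', sfxPop bs qs = (x, bs', qs') ∧ (bs' ++ qs').Perm t ∧
      bs'.Pairwise (· ≤ ·) ∧ qs'.Pairwise (· ≤ ·) ∧ QInv A' qs' ∧
      (∀ b ∈ bs', b ∈ A') ∧ (∀ b ∈ A, b ∈ A') ∧ x ∈ A' := by
  obtain ⟨bs', qs', hpop, hperm, hbs', hqs', hmem, hcase⟩ := pop_step hp hbs hqs hx
  rcases hcase with ⟨hq, hxbs⟩ | hq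
  · exact ⟨bs', qs', A, hpop, hperm, hbs', hqs', hq ▸ hQ,
      fun b hb => hsub b (hmem b hb), fun b hb => hb, hsub x hxbs⟩
  · refine ⟨bs', qs', x :: A, hpop, hperm, hbs', hqs', (hq ▸ hQ).2,
      fun b hb => List.mem_cons_of_mem _ (hsub b (hmem b hb)),
      fun b hb => List.mem_cons_of_mem _ hb, List.mem_cons_self⟩

-- PART 2: the sorted-list middle model equals the suffix two-queue model.
lemma spec_eq_sfx (k : Int) : ∀ (fuel : Nat) (s bs qs : List Int) (ans : Int),
    s.Perm (bs ++ qs) → s.Pairwise (· ≤ ·) → bs.Pairwise (· ≤ ·) → qs.Pairwise (· ≤ ·) →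
    QInv bs qs → specLoop k fuel s ans = sfxLoop k fuel bs qs ans := by
  intro fuel
  induction fuel with
  | zero => intro s bs qs ans _ _ _ _ _; rfl
  | succ fuel ih =>
    intro s bs qs ans hp hs hbs hqs hQ
    match hse : s with
    | [] =>
      have : bs ++ qs = [] := hp.symm.eq_nil
      rcases List.append_eq_nil_iff.mp this with ⟨h1, h2⟩
      subst h1; subst h2
      rfl
    | [x] =>
      have heq : bs ++ qs = [x] := List.perm_singleton.mp hp.symm
      rcases List.append_eq_singleton_iff.mp heq with ⟨h1, h2⟩ | ⟨h1, h2⟩ <;> subst h1 <;> subst h2 <;>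
        simp [specLoop, sfxLoop, sfxPop]
    | x :: y :: rest =>
      have hxmin : ∀ b ∈ bs ++ qs, x ≤ b :=
        fun b hb => pairwise_le_head hs b (hp.symm.mem_iff.mp hb)
      obtain ⟨bs1, qs1, A1, hpop1, hperm1, hbs1, hqs1, hQ1, hsub1, _, hxA1⟩ :=
        pop_inv hp.symm hbs hqs hxmin hQ (fun b hb => hb)
      have hs1 : (y :: rest).Pairwise (· ≤ ·) := (List.pairwise_cons.mp hs).2
      have hymin : ∀ b ∈ bs1 ++ qs1, y ≤ b :=
        fun b hb => pairwise_le_head hs1 b (hperm1.mem_iff.mp hb)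
      obtain ⟨bs2, qs2, A2, hpop2, hperm2, hbs2, hqs2, hQ2, hsub2, hA12, hyA2⟩ :=
        pop_inv hperm1 hbs1 hqs1 hymin hQ1 hsub1
      have hxA2 : x ∈ A2 := hA12 x hxA1
      have hxy : x ≤ y := (List.pairwise_cons.mp hs).1 y List.mem_cons_self
      have hbound : ∀ q ∈ qs2, q ≤ x + y * 2 := QInv_bound hQ2 x y hxA2 hyA2 hxy
      have hrest : ∀ b ∈ bs2 ++ qs2, y ≤ b := by
        intro b hb
        exact pairwise_le_head hs1 b (List.mem_cons_of_mem _ (hperm2.mem_iff.mp hb))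
      have hlen : bs.length + qs.length = rest.length + 2 := by
        have := hp.length_eq; simp at this; omega
      have hne : bs ++ qs ≠ [] := by
        intro hnil; rw [hnil] at hp; have := hp.eq_nil; simp at this
      have hsm : (sfxPop bs qs).1 = x := by rw [hpop1]
      -- both sides branch identically
      have hmain : sfxLoop k (fuel + 1) bs qs ans =
          (if x < k then
            (if bs.length + qs.length ≤ 1 then -1
             else sfxLoop k fuel bs2 (qs2 ++ [x + y * 2]) (ans + 1))
           else ans) := by
        match hbse : bs, hqse : qs with
        | [], [] => simp at hne
        | [], q :: qt => subst hbse hqse; simp only [sfxLoop, hpop1, hpop2]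
        | b :: bt, [] => subst hbse hqse; simp only [sfxLoop, hpop1, hpop2]
        | b :: bt, q :: qt => subst hbse hqse; simp only [sfxLoop, hpop1, hpop2]
      rw [hmain]
      by_cases hxk : x < k
      · have hgt : ¬ bs.length + qs.length ≤ 1 := by omega
        simp only [specLoop, if_pos hxk, if_neg hgt]
        refine ih _ _ _ _ ?_ ?_ hbs2 ?_ ?_
        · exact (insort_perm (x + y * 2) rest).trans ((hperm2.symm.cons _).trans
            (((List.perm_append_singleton _ _).symm).trans
              (List.Perm.of_eq (List.append_assoc _ _ _))))
        · exact insort_sorted _ ((List.pairwise_cons.mp hs1).2)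
        · refine List.pairwise_append.mpr ⟨hqs2, List.pairwise_singleton _ _, ?_⟩
          intro a ha b hb
          simp at hb; subst hb
          exact hbound a ha
        · refine QInv_append (QInv_weaken hQ2 hsub2) ⟨x, y, rfl, hxy, ?_, ?_⟩
          · exact fun b hb => hrest b (List.mem_append.mpr (Or.inl hb))
          · exact fun q hq => hrest q (List.mem_append.mpr (Or.inr hq))
      · simp [specLoop, hxk]

lemma sfxPop_length {bs qs : List Int} (h : ¬(bs = [] ∧ qs = [])) :
    (sfxPop bs qs).2.1.length + (sfxPop bs qs).2.2.length + 1 = bs.length + qs.length := by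
  match bs, qs with
  | [], [] => exact absurd ⟨rfl, rfl⟩ h
  | [], q :: qt => simp [sfxPop]
  | b :: bt, [] => simp [sfxPop]
  | b :: bt, q :: qt => by_cases hbq : b ≤ q <;> simp [sfxPop, hbq] <;> omega

lemma sfxLoop_step (k : Int) (fuel : Nat) (bs qs : List Int) (ans : Int)
    (h : ¬(bs = [] ∧ qs = [])) :
    sfxLoop k (fuel + 1) bs qs ans =
      if (sfxPop bs qs).1 < k then
        if bs.length + qs.length ≤ 1 then -1
        else sfxLoop k fuel (sfxPop (sfxPop bs qs).2.1 (sfxPop bs qs).2.2).2.1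
          ((sfxPop (sfxPop bs qs).2.1 (sfxPop bs qs).2.2).2.2 ++
            [(sfxPop bs qs).1 + (sfxPop (sfxPop bs qs).2.1 (sfxPop bs qs).2.2).1 * 2]) (ans + 1)
      else ans := by
  match bs, qs with
  | [], [] => exact absurd ⟨rfl, rfl⟩ h
  | [], q :: qt => rfl
  | b :: bt, [] => rfl
  | b :: bt, q :: qt => rfl

-- index/suffix correspondence for one Source B pop block
lemma pyPop_corr (base blends : List Int) (i j : Nat) (hi : i ≤ base.length) (hj : j ≤ blends.length)
    (hne : ¬(base.drop i = [] ∧ blends.drop j = [])) :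
    sfxPop (base.drop i) (blends.drop j) =
      ((pyPop base i blends j).1, base.drop (pyPop base i blends j).2.1,
        blends.drop (pyPop base i blends j).2.2)
    ∧ (pyPop base i blends j).2.1 ≤ base.length ∧ (pyPop base i blends j).2.2 ≤ blends.length := by
  rcases hbse : base.drop i with _ | ⟨b, bt⟩ <;> rcases hqse : blends.drop j with _ | ⟨q, qt⟩
  · exact absurd ⟨hbse, hqse⟩ hne
  · -- base exhausted, blends not
    have hjlt : j < blends.length := by
      by_contra hc
      rw [List.drop_eq_nil_iff.mpr (le_of_not_gt hc)] at hqse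
      cases hqse
    have hilen : base.length ≤ i := List.drop_eq_nil_iff.mp hbse
    have hcond : baseFirst base i blends j = false := by
      unfold baseFirst
      simp [Nat.ne_of_lt hjlt]
      omega
    have hq? : blends[j]? = some q := by rw [← List.head?_drop, hqse]; rfl
    have hgd : blends.getD j 0 = q := by simp [List.getD_eq_getElem?_getD, hq?]
    have hdj : blends.drop (j + 1) = qt := by rw [← List.tail_drop, hqse]; rfl
    refine ⟨?_, ?_, ?_⟩
    · simp [sfxPop, pyPop, hcond, hdj, hbse, hq?]
    · simpa [pyPop, hcond] using hi
    · simpa [pyPop, hcond] using hjlt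
  · -- blends exhausted, base not
    have hilt : i < base.length := by
      by_contra hc
      rw [List.drop_eq_nil_iff.mpr (le_of_not_gt hc)] at hbse
      cases hbse
    have hjlen : j = blends.length := le_antisymm hj (List.drop_eq_nil_iff.mp hqse)
    have hcond : baseFirst base i blends j = true := by
      unfold baseFirst; simp [hjlen]
    have hb? : base[i]? = some b := by rw [← List.head?_drop, hbse]; rfl
    have hgd : base.getD i 0 = b := by simp [List.getD_eq_getElem?_getD, hb?]
    have hdi : base.drop (i + 1) = bt := by rw [← List.tail_drop, hbse]; rfl
    refine ⟨?_, ?_, ?_⟩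
    · simp [sfxPop, pyPop, hcond, hdi, hqse, hb?]
    · simpa [pyPop, hcond] using hilt
    · simpa [pyPop, hcond] using hj
  · -- both available: compare the fronts
    have hilt : i < base.length := by
      by_contra hc
      rw [List.drop_eq_nil_iff.mpr (le_of_not_gt hc)] at hbse
      cases hbse
    have hjlt : j < blends.length := by
      by_contra hc
      rw [List.drop_eq_nil_iff.mpr (le_of_not_gt hc)] at hqse
      cases hqse
    have hb? : base[i]? = some b := by rw [← List.head?_drop, hbse]; rfl
    have hq? : blends[j]? = some q := by rw [← List.head?_drop, hqse]; rfl
    have hgb : base.getD i 0 = b := by simp [List.getD_eq_getElem?_getD, hb?]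
    have hgq : blends.getD j 0 = q := by simp [List.getD_eq_getElem?_getD, hq?]
    have hdi : base.drop (i + 1) = bt := by rw [← List.tail_drop, hbse]; rfl
    have hdj : blends.drop (j + 1) = qt := by rw [← List.tail_drop, hqse]; rfl
    have hcond : baseFirst base i blends j = decide (b ≤ q) := by
      unfold baseFirst
      have h1 : (j == blends.length) = false := by simp [Nat.ne_of_lt hjlt]
      have h2 : decide (i < base.length) = true := by simp [hilt]
      rw [h1, h2, hgb, hgq]
      simp
    by_cases hbq : b ≤ q
    · refine ⟨?_, ?_, ?_⟩
      · simp [sfxPop, pyPop, hcond, hbq, hdi, hqse, hb?]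
      · simpa [pyPop, hcond, hbq] using hilt
      · simpa [pyPop, hcond, hbq] using hj
    · refine ⟨?_, ?_, ?_⟩
      · simp [sfxPop, pyPop, hcond, hbq, hdj, hbse, hq?]
      · simpa [pyPop, hcond, hbq] using hi
      · simpa [pyPop, hcond, hbq] using hjlt

-- PART 3: the suffix model equals B's index-based port.
lemma sfx_eq_alt (k : Int) (base : List Int) : ∀ (fuel : Nat) (i j : Nat) (blends : List Int) (ans : Int),
    i ≤ base.length → j ≤ blends.length →
    altLoop k base fuel i j blends ans = sfxLoop k fuel (base.drop i) (blends.drop j) ans := by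
  intro fuel
  induction fuel with
  | zero => intro i j blends ans _ _; rfl
  | succ fuel ih =>
    intro i j blends ans hi hj
    by_cases hboth : base.drop i = [] ∧ blends.drop j = []
    · obtain ⟨h1, h2⟩ := hboth
      have hjlen : j = blends.length := le_antisymm hj (List.drop_eq_nil_iff.mp h2)
      have hi? : base[i]? = none := by rw [← List.head?_drop, h1]; rfl
      have hcond : baseFirst base i blends j = true := by unfold baseFirst; simp [hjlen]
      simp [altLoop, sfxLoop, hcond, hi?, h1, h2]
    · obtain ⟨hsfx, hi1, hj1⟩ := pyPop_corr base blends i j hi hj hboth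
      have hsel : (if baseFirst base i blends j then base[i]? else blends[j]?) =
          some (pyPop base i blends j).1 := by
        by_cases hc : baseFirst base i blends j
        · have hilt : i < base.length := by
            by_contra hcc
            have h1 : base.drop i = [] := List.drop_eq_nil_iff.mpr (le_of_not_gt hcc)
            have h2 : blends.drop j ≠ [] := fun h2 => hboth ⟨h1, h2⟩
            have hjlt : j < blends.length := by
              by_contra hc2
              exact h2 (List.drop_eq_nil_iff.mpr (le_of_not_gt hc2))
            unfold baseFirst at hc
            simp [Nat.ne_of_lt hjlt] at hc
            omega
          have hsome : base[i]? = some (base.getD i 0) := by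
            simp [List.getD_eq_getElem?_getD, List.getElem?_eq_getElem hilt]
          rw [if_pos hc, hsome]
          unfold pyPop
          rw [if_pos hc]
        · have hjlt : j < blends.length := by
            by_contra hcc
            have h2 : blends.drop j = [] := List.drop_eq_nil_iff.mpr (le_of_not_gt hcc)
            have hjlen : j = blends.length := le_antisymm hj (List.drop_eq_nil_iff.mp h2)
            unfold baseFirst at hc
            simp [hjlen] at hc
          have hsome : blends[j]? = some (blends.getD j 0) := by
            simp [List.getD_eq_getElem?_getD, List.getElem?_eq_getElem hjlt]
          rw [if_neg hc, hsome]
          unfold pyPop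
          rw [if_neg hc]
      have hlen1 : (sfxPop (base.drop i) (blends.drop j)).2.1.length +
          (sfxPop (base.drop i) (blends.drop j)).2.2.length + 1 =
          (base.drop i).length + (blends.drop j).length := sfxPop_length hboth
      rw [sfxLoop_step k fuel _ _ ans hboth]
      simp only [altLoop, hsel]
      have hsm : (pyPop base i blends j).1 = (sfxPop (base.drop i) (blends.drop j)).1 := by
        rw [hsfx]
      rw [← hsm]
      by_cases hk : (pyPop base i blends j).1 < k
      · simp only [if_pos hk]
        have hlens : (base.length - i) + (blends.length - j) =
            (base.drop i).length + (blends.drop j).length := by simp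
        by_cases hle : (base.length - i) + (blends.length - j) ≤ 1
        · rw [if_pos hle, if_pos (by omega : (base.drop i).length + (blends.drop j).length ≤ 1)]
        · rw [if_neg hle, if_neg (by omega : ¬ (base.drop i).length + (blends.drop j).length ≤ 1)]
          have hne2 : ¬(base.drop (pyPop base i blends j).2.1 = [] ∧
              blends.drop (pyPop base i blends j).2.2 = []) := by
            intro ⟨h1, h2⟩
            rw [hsfx] at hlen1
            simp only [h1, h2] at hlen1
            simp at hlen1
            omega
          obtain ⟨hsfx2, hi2, hj2⟩ := pyPop_corr base blends _ _ hi1 hj1 hne2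
          simp only [hsfx, hsfx2]
          have hrec := ih (pyPop base (pyPop base i blends j).2.1 blends (pyPop base i blends j).2.2).2.1
            (pyPop base (pyPop base i blends j).2.1 blends (pyPop base i blends j).2.2).2.2
            (blends ++ [(pyPop base i blends j).1 +
              (pyPop base (pyPop base i blends j).2.1 blends (pyPop base i blends j).2.2).1 * 2])
            (ans + 1) hi2 (le_trans hj2 (by simp))
          rw [hrec, List.drop_append_of_le_length hj2]
      · simp only [if_neg hk]

-- ===== VERDICT (by name: the statement is the Claim_ definition above) =====
theorem solution_spec : Claim_equal_solution := by
  intro scoville k _ _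
  unfold Spec_solution solution solution_alt
  rw [sfx_eq_alt k _ scoville.length 0 0 [] 0 (Nat.zero_le _) (Nat.zero_le _)]
  simp only [List.drop_zero]
  rw [← spec_eq_sfx k scoville.length _ _ [] 0 (by simp) (PySem.List.sorted_pairwise scoville (fun x => x)) (PySem.List.sorted_pairwise scoville (fun x => x)) (by simp) trivial]
  exact heap_eq_spec k scoville.length _ _ 0 (List.Perm.refl _) (PySem.List.sorted_pairwise scoville (fun x => x))
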